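-- pv_equiv track=rewrite | github.com/Oburec1985/OburecGH | wp/bu/002_trylEnu/scripts/extract_dx_v2.py | decode_dfm_value
-- ===== SOURCE A (Python) =====
-- def decode_dfm_value(val):
--     """Robustly decodes Delphi DFM values."""
--     if not val: return ""
--     # Remove leading/trailing quotes if it's a single quoted string
--     val = val.strip()
--
--     parts = []
--     i = 0
--     while i < len(val):
--         if val[i] == "'":
--             i += 1
--             start = i
--             while i < len(val) and val[i] != "'":
--                 i += 1
--             parts.append(val[start:i])
--             i += 1
--         elif val[i] == "#":
--             i += 1
--             start = i
--             while i < len(val) and val[i].isdigit():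
--                 i += 1
--             if start < i:
--                 try:
--                     code = int(val[start:i])
--                     if 0 <= code <= 255:
--                         # Handle old-style Ansi characters in DFMs (cp1251 for RU)
--                         parts.append(bytes([code]).decode('cp1251'))
--                     else:
--                         # Handle Unicode characters (#1055 etc)
--                         parts.append(chr(code))
--                 except:
--                     pass
--         elif val[i] in [' ', '+', '\r', '\n', '\t']:
--             i += 1
--         else:
--             # Junk or something else, just skip
--             i += 1
--     return "".join(parts)
-- ===== SOURCE B (Python) =====
-- import re
--
-- _TOKEN = re.compile(r"'([^']*)'?|#(\d+)")
--
-- def decode_dfm_value(val):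
--     """Robustly decodes Delphi DFM values (regex-scanner rewrite)."""
--     if not val: return ""
--     val = val.strip()
--     parts = []
--     for m in _TOKEN.finditer(val):
--         if m.group(1) is not None:
--             parts.append(m.group(1))
--         else:
--             try:
--                 code = int(m.group(2))
--                 if 0 <= code <= 255:
--                     parts.append(bytes([code]).decode('cp1251'))
--                 else:
--                     parts.append(chr(code))
--             except:
--                 pass
--     return "".join(parts)
-- ===== Notes on version B (the rewrite author's own statement) =====
-- stated objective: idiomatic
-- what changed: A's hand-written index/while loop with four branch kinds is replaced by one compiled regex finditer pass that yields exactly the quoted runs and the numeric character codes, each match decoded by the same int/cp1251/chr try-except; gaps between matches are skipped implicitly, and the C regex engine gives a large constant-factor speedup.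
-- outside the precondition, e.g. on decode_dfm_value("'#55296'"): A returns '#55296', B returns '#55296'
import Mathlib
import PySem

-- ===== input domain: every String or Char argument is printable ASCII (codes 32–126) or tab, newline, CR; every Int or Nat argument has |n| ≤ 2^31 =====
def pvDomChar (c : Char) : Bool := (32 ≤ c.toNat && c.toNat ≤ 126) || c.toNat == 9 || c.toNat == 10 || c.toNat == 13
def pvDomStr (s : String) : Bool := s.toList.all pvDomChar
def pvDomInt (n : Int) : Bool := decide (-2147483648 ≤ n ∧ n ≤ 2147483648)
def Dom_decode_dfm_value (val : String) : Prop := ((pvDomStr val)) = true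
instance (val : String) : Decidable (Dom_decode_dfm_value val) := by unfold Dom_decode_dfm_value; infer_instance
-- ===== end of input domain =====

-- B replaces A's hand-written index loop with a single regex scan ('([^']*)'?|#(\d+)) over the
-- string, decoding each match; objective: idiomatic.  Return-value equivalence only (no mutation).

-- cp1251 decode table for bytes 128..255 (byte 0x98 is undefined in cp1251 → none, the decode raises
-- and A's/B's try/except skips the character); bytes 0..127 decode to themselves.  Shared data, exact.
def pvCp1251Hi : List (Option Nat) := [some 1026, some 1027, some 8218, some 1107, some 8222, some 8230, some 8224, some 8225, some 8364, some 8240, some 1033, some 8249, some 1034, some 1036, some 1035, some 1039, some 1106, some 8216, some 8217, some 8220, some 8221, some 8226, some 8211, some 8212, none, some 8482, some 1113, some 8250, some 1114, some 1116, some 1115, some 1119, some 160, some 1038, some 1118, some 1032, some 164, some 1168, some 166, some 167, some 1025, some 169, some 1028, some 171, some 172, some 173, some 174, some 1031, some 176, some 177, some 1030, some 1110, some 1169, some 181, some 182, some 183, some 1105, some 8470, some 1108, some 187, some 1112, some 1029, some 1109, some 1111, some 1040, some 1041, some 1042, some 1043, some 1044, some 1045, some 1046, some 1047, some 1048, some 1049,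 some 1050, some 1051, some 1052, some 1053, some 1054, some 1055, some 1056, some 1057, some 1058, some 1059, some 1060, some 1061, some 1062, some 1063, some 1064, some 1065, some 1066, some 1067, some 1068, some 1069, some 1070, some 1071, some 1072, some 1073, some 1074, some 1075, some 1076, some 1077, some 1078, some 1079, some 1080, some 1081, some 1082, some 1083, some 1084, some 1085, some 1086, some 1087, some 1088, some 1089, some 1090, some 1091, some 1092, some 1093, some 1094, some 1095, some 1096, some 1097, some 1098, some 1099, some 1100, some 1101, some 1102, some 1103]

-- bytes([n]).decode('cp1251') : none exactly where Python raises UnicodeDecodeError (n = 152)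
def pvCp1251 (n : Nat) : Option Char :=
  if n < 128 then some (Char.ofNat n) else (pvCp1251Hi.getD (n - 128) none).map Char.ofNat

-- ===== PORT A =====
-- A's while loop over the stripped string; chr(code) ported by hand: exact for every code Python's
-- chr returns a scalar value for; on surrogate codes (excluded by Pre_) Python returns a lone
-- surrogate no Lean Char can hold, the port skips the character there.
def pvLoopA (cs : List Char) : List String :=
  match cs with
  | [] => []
  | c :: rest =>
    if c = '\'' then
      let content := rest.takeWhile (fun ch => ch ≠ '\'')
      String.ofList content :: pvLoopA ((rest.drop content.length).drop 1)
    else if c = '#' then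
      let digits := rest.takeWhile PySem.Chars.isdigit
      if 0 < digits.length then
        match PySem.Int.ofChars? digits with
        | none => pvLoopA (rest.drop digits.length)          -- except: pass (int never fails here)
        | some code =>
          if 0 ≤ code ∧ code ≤ 255 then
            match pvCp1251 code.toNat with
            | some ch => String.ofList [ch] :: pvLoopA (rest.drop digits.length)
            | none => pvLoopA (rest.drop digits.length)      -- UnicodeDecodeError → except: pass
          else
            if code < 1114112 ∧ (code < 55296 ∨ 57344 ≤ code) then
              String.ofList [Char.ofNat code.toNat] :: pvLoopA (rest.drop digits.length)
            else pvLoopA (rest.drop digits.length)           -- chr ValueError → except: pass (surrogates: outside Pre_)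
      else pvLoopA rest
    else if c ∈ [' ', '+', '\r', '\n', '\t'] then pvLoopA rest
    else pvLoopA rest
termination_by cs.length
decreasing_by all_goals simp

def decode_dfm_value (val : String) : String :=
  if val = "" then "" else PySem.Str.join "" (pvLoopA (PySem.Str.strip val).toList)

-- ===== PORT B =====
-- Source B's regex tokens: a quoted run '([^']*)'? or a coded character #(\d+)
inductive PvTok
  | quoted : List Char → PvTok
  | code : List Char → PvTok

-- one attempted regex match at the current position: the token and how many chars it consumed
def pvMatchAt (cs : List Char) : Option (PvTok × Nat) :=
  match cs with
  | [] => none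
  | c :: rest =>
    if c = '\'' then
      let g := rest.takeWhile (fun ch => ch ≠ '\'')
      some (PvTok.quoted g, 1 + g.length + (if g.length < rest.length then 1 else 0))
    else if c = '#' then
      let d := rest.takeWhile PySem.Chars.isdigit
      if 0 < d.length then some (PvTok.code d, 1 + d.length) else none
    else none

theorem pvMatchAt_pos (cs : List Char) (t : PvTok) (k : Nat)
    (h : pvMatchAt cs = some (t, k)) : 0 < k := by
  match cs with
  | [] => simp [pvMatchAt] at h
  | c :: rest =>
    simp only [pvMatchAt] at h
    split_ifs at h with h1 h2 h3 <;> simp_all <;> omega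

-- finditer: emit the match at the current position, or slide one char right
def pvScan (cs : List Char) : List PvTok :=
  match cs with
  | [] => []
  | c :: rest =>
    match h : pvMatchAt (c :: rest) with
    | some (t, k) => t :: pvScan ((c :: rest).drop k)
    | none => pvScan rest
termination_by cs.length
decreasing_by
  · have := pvMatchAt_pos _ _ _ h; simp; omega
  · simp

-- the loop body over one match: group 1 as-is, else int/cp1251/chr inside try/except (none = pass)
def pvDecodeTok (t : PvTok) : Option String :=
  match t with
  | PvTok.quoted g => some (String.ofList g)
  | PvTok.code d =>
    match PySem.Int.ofChars? d with
    | none => none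
    | some code =>
      if 0 ≤ code ∧ code ≤ 255 then
        (pvCp1251 code.toNat).map (fun ch => String.ofList [ch])
      else
        if code < 1114112 ∧ (code < 55296 ∨ 57344 ≤ code) then
          some (String.ofList [Char.ofNat code.toNat])
        else none

def decode_dfm_value_alt (val : String) : String :=
  if val = "" then ""
  else PySem.Str.join "" ((pvScan (PySem.Str.strip val).toList).filterMap pvDecodeTok)

-- ===== PRECONDITION & SPEC =====
-- Scans the input for '#' followed by a digit run whose value is a UTF-16 surrogate (55296..57343)
def pvNoSurr (cs : List Char) : Bool :=
  match cs with
  | [] => true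
  | c :: rest =>
    (if c = '#' then
      let d := rest.takeWhile PySem.Chars.isdigit
      let n : Nat := d.foldl (fun a ch => 10 * a + (ch.toNat - 48)) 0
      d.length = 0 || decide (n < 55296 ∨ 57344 ≤ n)
     else true) && pvNoSurr rest

-- Pre_ excludes inputs containing '#' followed by a digit run that decodes to a UTF-16 surrogate
-- code point: there A (and B) return a lone surrogate, which is not a value of the Lean type String
-- (no Char can hold it).  It over-approximates slightly by also checking '#'-digit runs inside quotes.
def Pre_decode_dfm_value (val : String) : Prop := pvNoSurr val.toList = true
instance (val : String) : Decidable (Pre_decode_dfm_value val) := by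
  unfold Pre_decode_dfm_value; infer_instance

def pvWitness_decode_dfm_value : String := "'Text'#32#1055#255"

def Spec_decode_dfm_value (val : String) (out : String) : Prop := out = decode_dfm_value_alt val
instance (val : String) (out : String) : Decidable (Spec_decode_dfm_value val out) := by unfold Spec_decode_dfm_value; infer_instance

-- ===== CLAIM (what is proved, stated in full; the proofs are below) =====
def Claim_equal_decode_dfm_value : Prop := ∀ (val : String), Dom_decode_dfm_value val → Pre_decode_dfm_value val → Spec_decode_dfm_value val (decode_dfm_value val)

-- ===== LEMMAS AND PROOFS =====
theorem pvLoopA_eq_scan (cs : List Char) :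
    pvLoopA cs = (pvScan cs).filterMap pvDecodeTok := by
  cases cs with
  | nil => simp [pvLoopA, pvScan]
  | cons c rest =>
    by_cases hq : c = '\''
    · -- quote branch
      have hm : pvMatchAt (c :: rest) =
          some (PvTok.quoted (rest.takeWhile (fun ch => ch ≠ '\'')),
                1 + (rest.takeWhile (fun ch => ch ≠ '\'')).length +
                  (if (rest.takeWhile (fun ch => ch ≠ '\'')).length < rest.length then 1 else 0)) := by
        simp [pvMatchAt, hq]
      rw [pvScan]
      split
      · rename_i t k heq
        rw [hm] at heq
        injection heq with heq
        injection heq with h1 h2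
        subst h1
        subst h2
        have hdrop : (c :: rest).drop
            (1 + (rest.takeWhile (fun ch => ch ≠ '\'')).length +
              (if (rest.takeWhile (fun ch => ch ≠ '\'')).length < rest.length then 1 else 0)) =
          (rest.drop (rest.takeWhile (fun ch => ch ≠ '\'')).length).drop 1 := by
          rw [List.drop_drop]
          by_cases hlt : (rest.takeWhile (fun ch => ch ≠ '\'')).length < rest.length
          · rw [if_pos hlt,
              show 1 + (rest.takeWhile (fun ch => ch ≠ '\'')).length + 1
                = ((rest.takeWhile (fun ch => ch ≠ '\'')).length + 1) + 1 by omega,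
              List.drop_succ_cons]
          · have hle : (rest.takeWhile (fun ch => ch ≠ '\'')).length ≤ rest.length :=
              List.IsPrefix.length_le (List.takeWhile_prefix _)
            have heqlen : (rest.takeWhile (fun ch => ch ≠ '\'')).length = rest.length := by omega
            rw [if_neg hlt, Nat.add_zero,
              show 1 + (rest.takeWhile (fun ch => ch ≠ '\'')).length
                = (rest.takeWhile (fun ch => ch ≠ '\'')).length + 1 by omega,
              List.drop_succ_cons, heqlen, List.drop_length]
            symm
            apply List.drop_eq_nil_of_le
            omega
        rw [hdrop]
        have hrec := pvLoopA_eq_scan ((rest.drop (rest.takeWhile (fun ch => ch ≠ '\'')).length).drop 1)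
        rw [List.filterMap_cons,
          show pvDecodeTok (PvTok.quoted (rest.takeWhile (fun ch => ch ≠ '\'')))
            = some (String.ofList (rest.takeWhile (fun ch => ch ≠ '\''))) from rfl,
          ← hrec]
        simp [pvLoopA, hq]
      · rename_i heq
        rw [hm] at heq
        simp at heq
    · by_cases hh : c = '#'
      · by_cases hd : 0 < (rest.takeWhile PySem.Chars.isdigit).length
        · have hm : pvMatchAt (c :: rest) =
              some (PvTok.code (rest.takeWhile PySem.Chars.isdigit),
                    1 + (rest.takeWhile PySem.Chars.isdigit).length) := by
            simp [pvMatchAt, hh, hd]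
          rw [pvScan]
          split
          · rename_i t k heq
            rw [hm] at heq
            injection heq with heq
            injection heq with h1 h2
            subst h1
            subst h2
            have hdrop : (c :: rest).drop (1 + (rest.takeWhile PySem.Chars.isdigit).length)
                = rest.drop (rest.takeWhile PySem.Chars.isdigit).length := by
              rw [Nat.add_comm, List.drop_succ_cons]
            rw [hdrop]
            have hrec := pvLoopA_eq_scan (rest.drop (rest.takeWhile PySem.Chars.isdigit).length)
            cases hof : PySem.Int.ofChars? (rest.takeWhile PySem.Chars.isdigit) with
            | none => simp [pvLoopA, hh, hd, pvDecodeTok, hof, hrec]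
            | some code =>
              by_cases h255 : 0 ≤ code ∧ code ≤ 255
              · cases hcp : pvCp1251 code.toNat with
                | none => simp [pvLoopA, hh, hd, pvDecodeTok, hof, h255, hcp, hrec]
                | some ch => simp [pvLoopA, hh, hd, pvDecodeTok, hof, h255, hcp, hrec]
              · by_cases hv : code < 1114112 ∧ (code < 55296 ∨ 57344 ≤ code)
                · simp [pvLoopA, hh, hd, pvDecodeTok, hof, h255, hv, hrec]
                · simp [pvLoopA, hh, hd, pvDecodeTok, hof, h255, hv, hrec]
          · rename_i heq
            rw [hm] at heq
            simp at heq
        · have hm : pvMatchAt (c :: rest) = none := by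
            have h0 : (rest.takeWhile PySem.Chars.isdigit).length = 0 := by omega
            simp [pvMatchAt, hh, h0]
          rw [pvScan]
          split
          · rename_i t k heq
            rw [hm] at heq
            simp at heq
          · have hrec := pvLoopA_eq_scan rest
            simp [pvLoopA, hh, hd, hrec]
      · have hm : pvMatchAt (c :: rest) = none := by simp [pvMatchAt, hq, hh]
        rw [pvScan]
        split
        · rename_i t k heq
          rw [hm] at heq
          simp at heq
        · have hrec := pvLoopA_eq_scan rest
          by_cases hw : c ∈ [' ', '+', '\r', '\n', '\t'] <;>
            simp [pvLoopA, hq, hh, hw, hrec]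
termination_by cs.length
decreasing_by all_goals simp

-- ===== VERDICT (by name: the statement is the Claim_ definition above) =====
theorem decode_dfm_value_spec : Claim_equal_decode_dfm_value := by
  intro val _ _
  unfold Spec_decode_dfm_value decode_dfm_value decode_dfm_value_alt
  rw [pvLoopA_eq_scan]
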